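-- pv_equiv track=rewrite | github.com/absognety/Competitive-Coding-Platforms | Hackerearth/Hexadecimal_Numbers.py | hexadecimal_numbers
-- ===== SOURCE A (Python) =====
-- lookup_dict = {"A":10,"B":11,"C":12,
--               "D":13,"E":14,"F":15}
--
-- def gcd(a,b):
--     if b == 0:
--         return a
--     else:
--         return gcd(b,a%b)
--
-- def convert_hex_to_int(hex_rep):
--     elements = list(hex_rep)
--     result = 0
--     N = len(elements)
--     i = 1
--     j = 0
--     while (N-i >= 0):
--         if elements[j] in lookup_dict:
--             result += (pow(16,N-i) * lookup_dict[elements[j]])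
--         else:
--             result += (int(elements[j]) * pow(16,N-i))
--         i += 1
--         j += 1
--     return result
--
-- def hexadecimal_numbers(L,R):
--     C = 0
--     for n in range(L,R+1):
--         hex_rep = hex(n)[2:].upper()
--         Fx = convert_hex_to_int(hex_rep)
--         if gcd(n,Fx) > 1:
--             C += 1
--     return C
-- ===== SOURCE B (Python) =====
-- def hexadecimal_numbers(L, R):
--     # Reconstructing n from its own hex digits gives back n, so gcd(n, Fx) = n:
--     # count the integers n in [L, R] with n > 1, in closed form.
--     return max(0, R - max(L, 2) + 1)
-- ===== Notes on version B (the rewrite author's own statement) =====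
-- stated objective: faster
-- what changed: The hex round-trip satisfies Fx == n, so gcd(n,Fx) = n and the loop counts n in [L,R] with n > 1; B replaces the whole loop by the closed form max(0, R - max(L,2) + 1).
import Mathlib
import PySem

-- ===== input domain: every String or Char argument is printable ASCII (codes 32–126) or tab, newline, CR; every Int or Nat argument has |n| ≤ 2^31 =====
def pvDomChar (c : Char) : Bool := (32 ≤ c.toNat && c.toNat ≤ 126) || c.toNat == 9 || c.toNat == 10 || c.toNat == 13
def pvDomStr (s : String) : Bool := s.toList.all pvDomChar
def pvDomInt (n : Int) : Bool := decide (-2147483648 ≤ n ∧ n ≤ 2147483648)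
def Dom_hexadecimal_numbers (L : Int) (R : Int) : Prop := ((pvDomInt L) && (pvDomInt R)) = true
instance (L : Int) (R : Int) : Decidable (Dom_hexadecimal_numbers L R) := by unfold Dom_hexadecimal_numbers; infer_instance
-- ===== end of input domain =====

-- B replaces A's per-element hex round-trip loop by the closed form max(0, R - max(L,2) + 1),
-- since Fx = n and gcd(n,n) = n for the n ≥ 0 that A handles (asymptotic speed-up).

-- ===== PORT A =====
-- lookup_dict membership/lookup for one char (A's dict has only these six keys)
def pvLookup (c : Char) : Option Int :=
  if c = 'A' then some 10 else if c = 'B' then some 11 else if c = 'C' then some 12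
  else if c = 'D' then some 13 else if c = 'E' then some 14 else if c = 'F' then some 15 else none

-- hex(n)[2:].upper() for 0 ≤ n (Pre_ excludes negative n, where Python's A raises):
-- uppercase hex digit characters, most significant first
def pvHexDigitChar (d : Nat) : Char :=
  if d < 10 then Char.ofNat (48 + d) else Char.ofNat (55 + d)

def pvHexChars (n : Nat) : List Char :=
  if h : n < 16 then [pvHexDigitChar n]
  else pvHexChars (n / 16) ++ [pvHexDigitChar (n % 16)]
decreasing_by exact Nat.div_lt_self (by omega) (by omega)

def pvHexUpper (n : Int) : String := String.ofList (pvHexChars n.toNat)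

-- the while loop of convert_hex_to_int: j walks the chars, exponent N-i counts down;
-- int(elements[j]) on a decimal digit char is its code minus 48 (exact on '0'..'9')
def pvConvAux : List Char → Nat → Int
  | [], _ => 0
  | c :: rest, e =>
    (match pvLookup c with
     | some v => (16:Int)^e * v
     | none => ((c.toNat : Int) - 48) * (16:Int)^e)
    + pvConvAux rest (e - 1)

def convert_hex_to_int (hex_rep : String) : Int :=
  let elements := hex_rep.toList
  pvConvAux elements (elements.length - 1)

-- recursive gcd with Python's % (floor mod, PySem.Int.mod)
def pvGcd (a b : Int) : Int :=
  if h : b = 0 then a else pvGcd b (PySem.Int.mod a b)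
termination_by b.natAbs
decreasing_by
  rcases lt_or_gt_of_ne h with hb | hb
  · have := PySem.Int.mod_neg_bounds a hb; omega
  · have h1 := PySem.Int.mod_nonneg a hb; have h2 := PySem.Int.mod_lt a hb; omega

def hexadecimal_numbers (L : Int) (R : Int) : Int :=
  (PySem.List.pyRange L (R + 1) 1).foldl
    (fun C n =>
      let hex_rep := pvHexUpper n
      let Fx := convert_hex_to_int hex_rep
      if pvGcd n Fx > 1 then C + 1 else C) 0

-- ===== PORT B =====
def hexadecimal_numbers_alt (L : Int) (R : Int) : Int := max 0 (R - max L 2 + 1)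

-- ===== PRECONDITION & SPEC =====
-- Pre_ excludes exactly the inputs where A raises: a nonempty range containing a negative n
-- (hex(n)[2:] then starts with 'x' and int('x') raises ValueError).
def Pre_hexadecimal_numbers (L : Int) (R : Int) : Prop := 0 ≤ L ∨ R < L
instance (L : Int) (R : Int) : Decidable (Pre_hexadecimal_numbers L R) := by
  unfold Pre_hexadecimal_numbers; infer_instance
def pvWitness_hexadecimal_numbers : Int × Int := (0, 9)

def Spec_hexadecimal_numbers (L : Int) (R : Int) (out : Int) : Prop := out = hexadecimal_numbers_alt L R
instance (L : Int) (R : Int) (out : Int) : Decidable (Spec_hexadecimal_numbers L R out) := by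
  unfold Spec_hexadecimal_numbers; infer_instance

-- ===== CLAIM (what is proved, stated in full; the proofs are below) =====
def Claim_equal_hexadecimal_numbers : Prop := ∀ (L : Int) (R : Int), Dom_hexadecimal_numbers L R → Pre_hexadecimal_numbers L R → Spec_hexadecimal_numbers L R (hexadecimal_numbers L R)


-- ===== LEMMAS AND PROOFS =====

-- digit characters round-trip through the conversion's per-char value
lemma pvCharVal (d : Nat) (hd : d < 16) :
    (match pvLookup (pvHexDigitChar d) with
     | some v => (16:Int)^0 * v
     | none => (((pvHexDigitChar d).toNat : Int) - 48) * (16:Int)^0) = (d : Int) := by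
  interval_cases d <;> decide

lemma pvConvAux_head (c : Char) (rest : List Char) (e : Nat) :
    pvConvAux (c :: rest) e =
    (match pvLookup c with
     | some v => (16:Int)^e * v
     | none => ((c.toNat : Int) - 48) * (16:Int)^e) + pvConvAux rest (e - 1) := rfl

lemma pvConvAux_append_digit (ds : List Char) (d : Nat) (hd : d < 16) :
    pvConvAux (ds ++ [pvHexDigitChar d]) ds.length
      = 16 * pvConvAux ds (ds.length - 1) + d := by
  induction ds with
  | nil =>
    simpa [pvConvAux] using pvCharVal d hd
  | cons c rest ih =>
    have hlen : (c :: rest).length = rest.length + 1 := rfl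
    simp only [List.cons_append, pvConvAux_head, hlen, Nat.add_sub_cancel, ih]
    ring_nf
    rcases hv : pvLookup c with _ | v <;> simp [hv] <;> ring

lemma pvHexChars_ne_nil (n : Nat) : pvHexChars n ≠ [] := by
  rw [pvHexChars]; split
  · simp
  · simp

lemma pvConv_hexChars (n : Nat) :
    pvConvAux (pvHexChars n) ((pvHexChars n).length - 1) = n := by
  induction n using Nat.strong_induction_on with
  | _ n ih =>
    rw [pvHexChars]
    split
    · rename_i h
      simpa [pvConvAux] using pvCharVal n h
    · rename_i h
      have hrec := ih (n / 16) (Nat.div_lt_self (by omega) (by omega))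
      have hne := pvHexChars_ne_nil (n / 16)
      have hlen : (pvHexChars (n / 16) ++ [pvHexDigitChar (n % 16)]).length - 1
          = (pvHexChars (n / 16)).length := by
        simp
      rw [hlen, pvConvAux_append_digit _ _ (Nat.mod_lt _ (by omega)), hrec]
      omega

lemma pvFx_eq (n : Int) (hn : 0 ≤ n) : convert_hex_to_int (pvHexUpper n) = n := by
  unfold convert_hex_to_int pvHexUpper
  simp only [String.toList_ofList]
  rw [pvConv_hexChars]
  omega

lemma pvGcd_self (n : Int) (hn : 0 ≤ n) : pvGcd n n = n := by
  rcases eq_or_lt_of_le hn with h | h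
  · rw [pvGcd]; simp [← h]
  · rw [pvGcd]
    have hne : n ≠ 0 := by omega
    have hm : PySem.Int.mod n n = 0 := (PySem.Int.mod_eq_zero_iff_dvd n n).mpr dvd_rfl
    rw [dif_neg hne, hm, pvGcd]
    simp

-- the counting fold over a range of nonnegative integers, in closed form
lemma pvCount (b : Int) : ∀ (k : Nat) (a C0 : Int), 0 ≤ a → (b - a).toNat ≤ k →
    (PySem.List.pyRange a b 1).foldl
      (fun C n =>
        let hex_rep := pvHexUpper n
        let Fx := convert_hex_to_int hex_rep
        if pvGcd n Fx > 1 then C + 1 else C) C0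
      = C0 + max 0 (b - max a 2) := by
  intro k
  induction k with
  | zero =>
    intro a C0 ha hk
    rw [PySem.List.pyRange_one_eq_nil (by omega)]
    simp only [List.foldl_nil]
    omega
  | succ k ih =>
    intro a C0 ha hk
    by_cases hab : b ≤ a
    · rw [PySem.List.pyRange_one_eq_nil hab]
      simp only [List.foldl_nil]
      omega
    · rw [PySem.List.pyRange_one_cons (by omega)]
      simp only [List.foldl_cons]
      rw [ih (a + 1) _ (by omega) (by omega)]
      simp only [pvFx_eq a ha, pvGcd_self a ha]
      split <;> omega

-- ===== VERDICT (by name: the statement is the Claim_ definition above) =====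
theorem hexadecimal_numbers_spec : Claim_equal_hexadecimal_numbers := by
  intro L R _ hpre
  unfold Spec_hexadecimal_numbers hexadecimal_numbers hexadecimal_numbers_alt
  rcases hpre with hL | hLR
  · rw [pvCount (R + 1) (R + 1 - L).toNat L 0 hL (by omega)]
    omega
  · rw [PySem.List.pyRange_one_eq_nil (by omega)]
    simp only [List.foldl_nil]
    omega
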